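-- pv_equiv track=rewrite | github.com/Hugekyung/teamnote1 | codingTest/goodString.py | solution
-- ===== SOURCE A (Python) =====
-- def solution(s):
--     result = 1
--     if len(s) == 1:
--         return result
--     else:
--         if len(set(s)) == 1:
--             return result
--         else:
--             tmp = []
--             for i in range(len(s)):
--                 for j in range(len(s)):
--                     if len(s[i:j+1]) != len(set(s[i:j+1])):
--                         continue
--                     else:
--                         tmp.append(s[i:j+1])
--             result = len(list(set(tmp))[1:])
--             return result
-- ===== SOURCE B (Python) =====
-- def solution(s):
--     good = set()
--     n = len(s)
--     for i in range(n):
--         seen = set()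
--         for j in range(i, n):
--             c = s[j]
--             if c in seen:
--                 break
--             seen.add(c)
--             good.add(s[i:j + 1])
--     return len(good)
-- ===== Notes on version B (the rewrite author's own statement) =====
-- stated objective: faster
-- what changed: A enumerates all (i,j) index pairs, slices s[i:j+1] for each and tests distinctness by building a set of its characters, then dedups the slice list at the end; B runs one sliding window per start index that extends while characters are new and breaks at the first repeat, adding windows into a set as it goes, so windows with a repeated character (and the quadratically many slices beyond the first repeat) are never built or tested.
import Mathlib
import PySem

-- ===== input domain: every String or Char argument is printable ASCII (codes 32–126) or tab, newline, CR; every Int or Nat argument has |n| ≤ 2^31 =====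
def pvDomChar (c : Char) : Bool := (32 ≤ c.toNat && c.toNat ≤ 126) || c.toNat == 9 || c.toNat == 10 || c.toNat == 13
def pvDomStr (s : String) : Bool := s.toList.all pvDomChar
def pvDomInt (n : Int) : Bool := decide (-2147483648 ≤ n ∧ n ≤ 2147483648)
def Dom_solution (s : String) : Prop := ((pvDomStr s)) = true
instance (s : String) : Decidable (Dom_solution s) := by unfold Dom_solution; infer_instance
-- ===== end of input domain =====

-- B replaces A's scan over all (i,j) slice pairs by a per-start sliding window that breaks
-- at the first repeated character (objective: faster; both count distinct duplicate-free substrings).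

-- ===== PORT A =====
def solution (s : String) : Int :=
  let l := s.toList
  let result : Int := 1
  if (l.length : Int) = 1 then result
  else if ((PySem.Set.ofList l).length : Int) = 1 then result
  else
    let tmp := (PySem.List.pyRange 0 (l.length : Int) 1).foldl (fun tmp i =>
      (PySem.List.pyRange 0 (l.length : Int) 1).foldl (fun tmp j =>
        let sub := PySem.List.slice l (some i) (some (j + 1))
        if ((sub.length : Int) ≠ ((PySem.Set.ofList sub).length : Int)) then tmp
        else tmp ++ [sub]) tmp) ([] : List (List Char))
    (((PySem.List.slice (PySem.Set.ofList tmp) (some 1) none).length : Int))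

-- ===== PORT B =====
-- inner 'for j in range(i, n)' with break-on-repeat: window = s[i:j+1], seen = its chars
def solAltInner : List Char → List Char → PySem.Set Char → PySem.Set (List Char) → PySem.Set (List Char)
  | _, [], _, good => good
  | window, c :: rest, seen, good =>
    if PySem.Set.contains seen c then good
    else solAltInner (window ++ [c]) rest (PySem.Set.add seen c) (PySem.Set.add good (window ++ [c]))

-- outer 'for i in range(n)': one inner run per suffix of s
def solAltOuter : List Char → PySem.Set (List Char) → PySem.Set (List Char)
  | [], good => good
  | l@(_ :: t), good => solAltOuter t (solAltInner [] l PySem.Set.empty good)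

def solution_alt (s : String) : Int :=
  ((solAltOuter s.toList PySem.Set.empty).length : Int)

-- ===== PRECONDITION & SPEC =====
def Spec_solution (s : String) (out : Int) : Prop := out = solution_alt s
instance (s : String) (out : Int) : Decidable (Spec_solution s out) := by unfold Spec_solution; infer_instance

-- ===== CLAIM (what is proved, stated in full; the proofs are below) =====
def Claim_equal_solution : Prop := ∀ (s : String), Dom_solution s → Spec_solution s (solution s)

-- ===== LEMMAS AND PROOFS =====

lemma set_ofList_length_eq_iff (xs : List Char) :
    (PySem.Set.ofList xs).length = xs.length ↔ xs.Nodup := by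
  constructor
  · intro h
    have h1 : (PySem.Set.ofList xs).toFinset = xs.toFinset := by
      ext a; simp [List.mem_toFinset, PySem.Set.mem_ofList]
    have h2 : xs.toFinset.card = xs.length := by
      rw [← h1, List.toFinset_card_of_nodup (PySem.Set.nodup_ofList xs), h]
    rw [List.card_toFinset] at h2
    have h3 := (List.dedup_sublist xs).eq_of_length h2
    rw [← h3]; exact xs.nodup_dedup
  · intro h; rw [PySem.Set.ofList_eq_self_of_nodup xs h]

def GoodE (l w : List Char) : Prop :=
  ∃ i k : Nat, 1 ≤ k ∧ k ≤ (l.drop i).length ∧ w = (l.drop i).take k ∧ w.Nodup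

lemma inner_nodup (rest : List Char) : ∀ (window : List Char) (seen : PySem.Set Char)
    (good : PySem.Set (List Char)), good.Nodup → (solAltInner window rest seen good).Nodup := by
  induction rest with
  | nil => intro _ _ _ h; exact h
  | cons c rest ih =>
    intro window seen good h
    rw [solAltInner]
    split
    · exact h
    · exact ih _ _ _ (PySem.Set.nodup_add _ _ h)

lemma outer_nodup (l : List Char) : ∀ (good : PySem.Set (List Char)),
    good.Nodup → (solAltOuter l good).Nodup := by
  induction l with
  | nil => intro _ h; exact h
  | cons c t ih => intro good h; exact ih _ (inner_nodup _ _ _ _ h)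

lemma inner_mem (rest : List Char) : ∀ (window : List Char) (seen : PySem.Set Char)
    (good : PySem.Set (List Char)), window.Nodup →
    (∀ c, PySem.Set.contains seen c = true ↔ c ∈ window) →
    ∀ w, w ∈ solAltInner window rest seen good ↔
      w ∈ good ∨ ∃ k : Nat, 1 ≤ k ∧ k ≤ rest.length ∧ w = window ++ rest.take k ∧
        (window ++ rest.take k).Nodup := by
  induction rest with
  | nil =>
    intro window seen good _ _ w
    simp [solAltInner]
  | cons c rest ih =>
    intro window seen good hwn hseen w
    rw [solAltInner]
    split
    · -- c ∈ window: nothing more is added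
      rename_i hc
      rw [hseen] at hc
      constructor
      · intro h; exact Or.inl h
      · rintro (h | ⟨k, hk1, _, hw, hnd⟩)
        · exact h
        · exfalso
          obtain ⟨k', rfl⟩ := Nat.exists_eq_add_of_le' hk1
          simp only [List.take_succ_cons] at hnd hw
          rw [List.nodup_append] at hnd
          exact hnd.2.2 c hc c (by simp) rfl
    · rename_i hc
      rw [hseen] at hc
      have hwn' : (window ++ [c]).Nodup := by
        simp [List.nodup_append, hwn]
        intro a ha rfl
        exact hc ha
      have hseen' : ∀ d, PySem.Set.contains (PySem.Set.add seen c) d = true ↔ d ∈ window ++ [c] := by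
        intro d
        rw [PySem.Set.contains_iff, PySem.Set.mem_add, ← PySem.Set.contains_iff, hseen]
        simp [or_comm]
      rw [ih _ _ _ hwn' hseen' w]
      rw [PySem.Set.mem_add]
      constructor
      · rintro ((h | h) | ⟨k, hk1, hk2, hw, hnd⟩)
        · exact Or.inl h
        · exact Or.inr ⟨1, le_refl 1, by simp only [List.length_cons]; omega, by simpa using h, by simpa [h] using hwn'⟩
        · refine Or.inr ⟨k + 1, by omega, by simp only [List.length_cons]; omega, ?_, ?_⟩
          · simpa [List.take_succ_cons] using hw
          · simpa [List.take_succ_cons] using hnd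
      · rintro (h | ⟨k, hk1, hk2, hw, hnd⟩)
        · exact Or.inl (Or.inl h)
        · obtain ⟨k', rfl⟩ := Nat.exists_eq_add_of_le' hk1
          simp only [List.take_succ_cons] at hw hnd
          rcases Nat.eq_zero_or_pos k' with rfl | hk'
          · simp only [List.take_zero] at hw
            exact Or.inl (Or.inr (by simpa using hw))
          · refine Or.inr ⟨k', hk', by simp only [List.length_cons] at hk2; omega, ?_, ?_⟩
            · simpa using hw
            · simpa using hnd

lemma goodE_cons (c : Char) (t : List Char) (w : List Char) :
    GoodE (c :: t) w ↔ (∃ k : Nat, 1 ≤ k ∧ k ≤ (c :: t).length ∧ w = (c :: t).take k ∧ w.Nodup) ∨ GoodE t w := by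
  constructor
  · rintro ⟨i, k, h1, h2, h3, h4⟩
    cases i with
    | zero => exact Or.inl ⟨k, h1, by simpa using h2, by simpa using h3, h4⟩
    | succ i => exact Or.inr ⟨i, k, h1, by simpa using h2, by simpa using h3, h4⟩
  · rintro (⟨k, h1, h2, h3, h4⟩ | ⟨i, k, h1, h2, h3, h4⟩)
    · exact ⟨0, k, h1, by simpa using h2, by simpa using h3, h4⟩
    · exact ⟨i + 1, k, h1, by simpa using h2, by simpa using h3, h4⟩

lemma outer_mem (l : List Char) : ∀ (good : PySem.Set (List Char)) (w : List Char),
    w ∈ solAltOuter l good ↔ w ∈ good ∨ GoodE l w := by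
  induction l with
  | nil =>
    intro good w
    simp [solAltOuter, GoodE]
  | cons c t ih =>
    intro good w
    rw [solAltOuter, ih,
      inner_mem (c :: t) [] PySem.Set.empty good List.nodup_nil
        (by intro d; simp [PySem.Set.empty]) w,
      goodE_cons]
    simp only [List.nil_append]
    constructor
    · rintro ((h | ⟨k, h1, h2, rfl, h4⟩) | h)
      exacts [Or.inl h, Or.inr (Or.inl ⟨k, h1, h2, rfl, h4⟩), Or.inr (Or.inr h)]
    · rintro (h | (⟨k, h1, h2, rfl, h4⟩ | h))
      exacts [Or.inl (Or.inl h), Or.inl (Or.inr ⟨k, h1, h2, rfl, h4⟩), Or.inr h]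

def tmpA (l : List Char) : List (List Char) :=
  (PySem.List.pyRange 0 (l.length : Int) 1).foldl (fun tmp i =>
    (PySem.List.pyRange 0 (l.length : Int) 1).foldl (fun tmp j =>
      let sub := PySem.List.slice l (some i) (some (j + 1))
      if ((sub.length : Int) ≠ ((PySem.Set.ofList sub).length : Int)) then tmp
      else tmp ++ [sub]) tmp) []

lemma foldl_append_ifnot {α β : Type} (p : α → Prop) [DecidablePred p] (f : α → β)
    (l : List α) (acc : List β) :
    l.foldl (fun acc x => if p x then acc else acc ++ [f x]) acc
      = acc ++ (l.filter (fun x => decide (¬ p x))).map f := by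
  induction l generalizing acc with
  | nil => simp
  | cons x t ih => by_cases h : p x <;> simp [h, ih]

lemma mem_tmpA (l : List Char) (w : List Char) :
    w ∈ tmpA l ↔ ∃ i j : Int, (0 ≤ i ∧ i < (l.length : Int)) ∧ (0 ≤ j ∧ j < (l.length : Int)) ∧
      ((PySem.List.slice l (some i) (some (j + 1))).length : Int)
        = ((PySem.Set.ofList (PySem.List.slice l (some i) (some (j + 1)))).length : Int) ∧
      w = PySem.List.slice l (some i) (some (j + 1)) := by
  unfold tmpA
  simp only []
  rw [show (fun (tmp : List (List Char)) (i : Int) =>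
      (PySem.List.pyRange 0 (l.length : Int) 1).foldl (fun tmp j =>
        let sub := PySem.List.slice l (some i) (some (j + 1))
        if ((sub.length : Int) ≠ ((PySem.Set.ofList sub).length : Int)) then tmp
        else tmp ++ [sub]) tmp)
    = (fun (tmp : List (List Char)) (i : Int) => tmp ++
        (((PySem.List.pyRange 0 (l.length : Int) 1).filter (fun j => decide (¬ ((PySem.List.slice l (some i) (some (j + 1))).length : Int)
            ≠ ((PySem.Set.ofList (PySem.List.slice l (some i) (some (j + 1)))).length : Int)))).map
          (fun j => PySem.List.slice l (some i) (some (j + 1)))))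
    from funext fun tmp => funext fun i => foldl_append_ifnot _ _ _ _]
  rw [PySem.List.foldl_append_eq_flatMap]
  simp only [List.nil_append, List.mem_flatMap, List.mem_map, List.mem_filter,
    PySem.List.mem_pyRange_one, decide_eq_true_eq, not_not]
  constructor
  · rintro ⟨i, hi, j, ⟨hj, hcond⟩, rfl⟩
    exact ⟨i, j, hi, hj, hcond, rfl⟩
  · rintro ⟨i, j, hi, hj, hcond, rfl⟩
    exact ⟨i, hi, j, ⟨hj, hcond⟩, rfl⟩

lemma goodE_ne_nil {l w : List Char} (h : GoodE l w) : w ≠ [] := by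
  rintro rfl
  obtain ⟨i, k, h1, h2, h3, -⟩ := h
  rcases List.take_eq_nil_iff.mp h3.symm with h | h
  · omega
  · rw [h] at h2; simp at h2; omega

lemma mem_tmpA_iff (l : List Char) (h2 : 2 ≤ l.length) (w : List Char) :
    w ∈ tmpA l ↔ w = [] ∨ GoodE l w := by
  rw [mem_tmpA]
  constructor
  · rintro ⟨i, j, ⟨hi0, hin⟩, ⟨hj0, hjn⟩, hcond, rfl⟩
    rw [PySem.List.slice_toNat l hi0 (by omega)] at hcond ⊢
    set a := i.toNat with ha
    set k0 := (j + 1).toNat - a with hk0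
    have hnd : ((l.drop a).take k0).Nodup := by
      rw [← set_ofList_length_eq_iff]
      exact_mod_cast hcond.symm
    by_cases hz : (l.drop a).take k0 = []
    · exact Or.inl hz
    · right
      refine ⟨a, min k0 (l.drop a).length, ?_, ?_, ?_, ?_⟩
      · rcases Nat.eq_zero_or_pos (min k0 (l.drop a).length) with hm | hm
        · exfalso
          apply hz
          rw [List.take_eq_take_min, hm]
          simp
        · exact hm
      · exact min_le_right _ _
      · exact List.take_eq_take_min
      · exact hnd
  · rintro (rfl | ⟨a, k, hk1, hk2, rfl, hnd⟩)
    · refine ⟨1, 0, ⟨by omega, by exact_mod_cast h2⟩, ⟨le_refl 0, by omega⟩, ?_, ?_⟩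
      · rw [PySem.List.slice_toNat l (by omega) (by omega)]
        norm_num
      · rw [PySem.List.slice_toNat l (by omega) (by omega)]
        norm_num
    · have hdl : (l.drop a).length = l.length - a := List.length_drop
      have han : a < l.length := by omega
      refine ⟨(a : Int), (a : Int) + (k : Int) - 1, ⟨by omega, by exact_mod_cast han⟩,
        ⟨by omega, by omega⟩, ?_, ?_⟩
      · have hs : PySem.List.slice l (some (a : Int)) (some (((a : Int) + (k : Int) - 1) + 1))
            = (l.drop a).take k := by
          rw [show ((a : Int) + (k : Int) - 1) + 1 = (a : Int) + (k : Int) by ring,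
            PySem.List.slice_natCast_add]
        rw [hs, (set_ofList_length_eq_iff _).2 hnd]
      · rw [show ((a : Int) + (k : Int) - 1) + 1 = (a : Int) + (k : Int) by ring,
          PySem.List.slice_natCast_add]

lemma nil_not_mem_S (l : List Char) : ([] : List Char) ∉ solAltOuter l PySem.Set.empty := by
  rw [outer_mem]
  rintro (h | h)
  · simp [PySem.Set.empty] at h
  · exact goodE_ne_nil h rfl

lemma S_nodup (l : List Char) : (solAltOuter l PySem.Set.empty).Nodup :=
  outer_nodup l _ List.nodup_nil

lemma main_general (l : List Char) (h2 : 2 ≤ l.length) :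
    (PySem.Set.ofList (tmpA l)).length = (solAltOuter l PySem.Set.empty).length + 1 := by
  have hperm : (PySem.Set.ofList (tmpA l)).Perm ([] :: solAltOuter l PySem.Set.empty) := by
    rw [List.perm_ext_iff_of_nodup (PySem.Set.nodup_ofList _)
      (List.nodup_cons.mpr ⟨nil_not_mem_S l, S_nodup l⟩)]
    intro w
    rw [PySem.Set.mem_ofList, mem_tmpA_iff l h2 w, List.mem_cons, outer_mem]
    simp [PySem.Set.empty]
  simpa using hperm.length_eq

lemma S_const (l : List Char) (c : Char) (hne : l ≠ [])
    (hall : ∀ x ∈ l, x = c) : (solAltOuter l PySem.Set.empty).length = 1 := by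
  have hperm : (solAltOuter l PySem.Set.empty).Perm [[c]] := by
    rw [List.perm_ext_iff_of_nodup (S_nodup l) (by simp)]
    intro w
    rw [outer_mem]
    simp only [List.mem_singleton]
    constructor
    · rintro (h | ⟨i, k, hk1, hk2, rfl, hnd⟩)
      · simp [PySem.Set.empty] at h
      · have hmem : ∀ x ∈ (l.drop i).take k, x = c := fun x hx =>
          hall x (List.mem_of_mem_drop (List.mem_of_mem_take hx))
        have hlen : ((l.drop i).take k).length = k := by
          rw [List.length_take]; omega
        match hw : (l.drop i).take k, hlen with
        | [], hlen => simp at hlen; omega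
        | [a], hlen => rw [hw] at hmem; simp [hmem a (by simp)]
        | a :: b :: t, hlen =>
          exfalso
          rw [hw] at hmem hnd
          have ha := hmem a (by simp)
          have hb := hmem b (by simp)
          rw [List.nodup_cons] at hnd
          exact hnd.1 (by simp [ha, hb])
    · rintro rfl
      right
      match l, hne with
      | a :: t, _ =>
        refine ⟨0, 1, le_refl 1, by simp, ?_, by simp⟩
        simp [hall a (by simp)]
  simpa using hperm.length_eq

lemma solution_eq_branches (s : String) :
    solution s = if (s.toList.length : Int) = 1 then 1
      else if ((PySem.Set.ofList s.toList).length : Int) = 1 then 1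
      else ((PySem.List.slice (PySem.Set.ofList (tmpA s.toList)) (some 1) none).length : Int) := rfl

lemma solution_agrees (s : String) : solution s = ((solAltOuter s.toList PySem.Set.empty).length : Int) := by
  rw [solution_eq_branches]
  split
  · rename_i h1
    have hl1 : s.toList.length = 1 := by exact_mod_cast h1
    match hls : s.toList, hl1 with
    | [c], _ =>
      rw [S_const [c] c (by simp) (by simp)]
      norm_num
  · split
    · rename_i h1 h2
      have hl2 : (PySem.Set.ofList s.toList).length = 1 := by exact_mod_cast h2
      have hne : s.toList ≠ [] := by
        rintro h
        rw [h] at hl2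
        simp [PySem.Set.ofList_nil] at hl2
      obtain ⟨c, hc⟩ : ∃ c, PySem.Set.ofList s.toList = [c] :=
        List.length_eq_one_iff.mp hl2
      have hall : ∀ x ∈ s.toList, x = c := by
        intro x hx
        have : x ∈ PySem.Set.ofList s.toList := (PySem.Set.mem_ofList _ _).mpr hx
        rw [hc] at this
        simpa using this
      rw [S_const s.toList c hne hall]
      norm_num
    · rename_i h1 h2
      have hl1 : s.toList.length ≠ 1 := by exact_mod_cast h1
      rcases Nat.lt_or_ge s.toList.length 2 with hlt | hge
      · have h0 : s.toList.length = 0 := by omega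
        rw [List.length_eq_zero_iff] at h0
        rw [h0]
        decide
      · rw [PySem.List.slice_from _ (by omega : (0:Int) ≤ 1)]
        have := main_general s.toList hge
        rw [List.length_drop, this]
        simp

-- ===== VERDICT (by name: the statement is the Claim_ definition above) =====
theorem solution_spec : Claim_equal_solution := by
  intro s _
  unfold Spec_solution solution_alt
  exact solution_agrees s
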